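-- pv_equiv track=rewrite | github.com/JiJiHoon/study-algorithm | boj/workbook/widerplanet/4/2161/main.py | solve
-- ===== SOURCE A (Python) =====
-- from collections import deque
--
-- def solve(data):
--     queue = deque([i for i in range(1, data + 1)])
--
--     result = []
--
--     while True:
--         result.append(queue.popleft())
--         if len(queue) == 0:
--             break
--         queue.rotate(-1)
--
--     return result
-- ===== SOURCE B (Python) =====
-- def solve(data):
--     cur = list(range(1, data + 1))
--     result = []
--     while cur:
--         disc, keep, take = [], [], True
--         for x in cur:
--             if take:
--                 disc.append(x)
--             else:
--                 keep.append(x)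
--             take = not take
--         if not take and keep:
--             # the pass ended on a discard: the pending move sends the first kept card to the bottom
--             keep = keep[1:] + [keep[0]]
--         result += disc
--         cur = keep
--     return result
-- ===== Notes on version B (the rewrite author's own statement) =====
-- stated objective: alternative
-- what changed: Replaces the per-card deque simulation (popleft then rotate(-1) for every card) with batched passes over a plain list: each pass splits the current list into alternating discarded and kept cards in one sweep and rotates the kept list when a pass ends on a discard.
-- outside the precondition, e.g. on solve(0): A raises IndexError, B returns []
import Mathlib
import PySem

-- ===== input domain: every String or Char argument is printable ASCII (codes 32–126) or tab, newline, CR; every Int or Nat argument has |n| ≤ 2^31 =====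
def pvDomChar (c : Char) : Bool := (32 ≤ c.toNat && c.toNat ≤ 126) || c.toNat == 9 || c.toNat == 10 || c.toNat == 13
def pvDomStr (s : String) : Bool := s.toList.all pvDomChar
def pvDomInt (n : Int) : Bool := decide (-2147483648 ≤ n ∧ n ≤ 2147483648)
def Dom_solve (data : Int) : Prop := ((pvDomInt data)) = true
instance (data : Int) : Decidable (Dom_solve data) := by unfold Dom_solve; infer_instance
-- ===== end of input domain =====

-- B replaces the per-card deque pop/rotate with batched passes over a plain list
-- (flush all alternating discards of a pass at once, rotating the kept cards when a pass ends on a discard): alternative decomposition.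

-- ===== PORT A =====
-- while True: result.append(queue.popleft()); if empty: break; queue.rotate(-1)
-- (one iteration = discard the front card, then move the new front card to the bottom)
def solveLoop : List Int → List Int → List Int
  | [], acc => acc                                    -- popleft on an empty deque raises (outside Pre_)
  | [x], acc => acc ++ [x]                            -- discard the last card, queue empty, break
  | x :: y :: rest, acc => solveLoop (rest ++ [y]) (acc ++ [x])
termination_by cur _ => cur.length
decreasing_by simp

def solve (data : Int) : List Int :=
  solveLoop (PySem.List.pyRange 1 (data + 1) 1) []

-- ===== PORT B =====
-- one step of the 'for x in cur' loop of Source B, state (disc, keep, take)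
def passStep (s : List Int × List Int × Bool) (x : Int) : List Int × List Int × Bool :=
  if s.2.2 then (s.1 ++ [x], s.2.1, false) else (s.1, s.2.1 ++ [x], true)

-- length fact the recursion of altLoop needs (cited in decreasing_by)
theorem passStep_keep_len (l : List Int) : ∀ (s : List Int × List Int × Bool),
    (l.foldl passStep s).2.1.length ≤ s.2.1.length + l.length := by
  induction l with
  | nil => intro s; simp
  | cons x xs ih =>
    intro s
    simp only [List.foldl_cons]
    refine le_trans (ih (passStep s x)) ?_
    unfold passStep
    split
    · simp
    · simp
      omega

-- while cur: run the pass, rotate keep when the pass ended on a discard, flush disc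
def altLoop : List Int → List Int → List Int
  | [], result => result
  | x :: xs, result =>
    let s := (x :: xs).foldl passStep ([], [], true)
    let keep := if s.2.2 = false ∧ s.2.1 ≠ [] then s.2.1.tail ++ [s.2.1.headI] else s.2.1
    altLoop keep (result ++ s.1)
termination_by cur _ => cur.length
decreasing_by
  have h := passStep_keep_len xs (passStep ([], [], true) x)
  simp only [passStep, if_pos, List.nil_append] at h
  split
  · rename_i hc
    have hpos : 0 < (List.foldl passStep (([] : List Int) ++ [x], ([] : List Int), false) xs).2.1.length := by
      have := hc.2
      simp only [List.foldl_cons, passStep, if_pos, List.nil_append] at this ⊢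
      exact List.length_pos_iff.mpr this
    simp only [List.foldl_cons, passStep, if_pos, List.nil_append] at hpos ⊢
    simp at h ⊢
    omega
  · simp only [List.foldl_cons, passStep, if_pos, List.nil_append] at h ⊢
    simp at h ⊢
    omega

def solve_alt (data : Int) : List Int :=
  altLoop (PySem.List.pyRange 1 (data + 1) 1) []

-- ===== PRECONDITION & SPEC =====
-- Pre_ excludes data ≤ 0, where A's queue is empty and its first popleft raises IndexError.
def Pre_solve (data : Int) : Prop := 1 ≤ data
instance (data : Int) : Decidable (Pre_solve data) := by unfold Pre_solve; infer_instance

def pvWitness_solve : Int := (5)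

def Spec_solve (data : Int) (out : List Int) : Prop := out = solve_alt data
instance (data : Int) (out : List Int) : Decidable (Spec_solve data out) := by unfold Spec_solve; infer_instance

-- ===== CLAIM (what is proved, stated in full; the proofs are below) =====
def Claim_equal_solve : Prop := ∀ (data : Int), Dom_solve data → Pre_solve data → Spec_solve data (solve data)

-- ===== LEMMAS AND PROOFS =====

-- pure two-at-a-time splitting of a pass: (discarded cards, kept cards)
def pairPass : List Int → List Int × List Int
  | [] => ([], [])
  | [x] => ([x], [])
  | x :: y :: rest =>
    let p := pairPass rest
    (x :: p.1, y :: p.2)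

theorem foldl_passStep_char : ∀ (l : List Int) (d k : List Int),
    l.foldl passStep (d, k, true)
      = (d ++ (pairPass l).1, k ++ (pairPass l).2, decide (l.length % 2 = 0)) := by
  intro l
  induction l using pairPass.induct with
  | case1 => intro d k; simp [pairPass]
  | case2 x => intro d k; simp [pairPass, passStep]
  | case3 x y rest ih =>
    intro d k
    rw [List.foldl_cons, List.foldl_cons]
    have h1 : passStep (d, k, true) x = (d ++ [x], k, false) := by simp [passStep]
    have h2 : passStep (d ++ [x], k, false) y = (d ++ [x], k ++ [y], true) := by simp [passStep]
    rw [h1, h2, ih]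
    simp [pairPass]
    omega

theorem pairPass_len_snd : ∀ (l : List Int), (pairPass l).2.length = l.length / 2 := by
  intro l
  induction l using pairPass.induct with
  | case1 => simp [pairPass]
  | case2 x => simp [pairPass]
  | case3 x y rest ih => simp [pairPass, ih]; omega

theorem solveLoop_acc : ∀ (n : Nat) (cur : List Int), cur.length ≤ n →
    ∀ acc, solveLoop cur acc = acc ++ solveLoop cur [] := by
  intro n
  induction n with
  | zero => intro cur h a; cases cur <;> simp_all; rw [solveLoop, solveLoop]; simp
  | succ n ih =>
    intro cur h a
    match cur with
    | [] => rw [solveLoop, solveLoop]; simp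
    | [x] => rw [solveLoop, solveLoop]; simp
    | x :: y :: rest =>
      rw [solveLoop, solveLoop]
      have hl : (rest ++ [y]).length ≤ n := by simp at h ⊢; omega
      rw [ih _ hl, ih _ hl ([] ++ [x])]
      simp

theorem pairPass_append_one (l : List Int) (a : Int) :
    pairPass (l ++ [a]) = if l.length % 2 = 0 then ((pairPass l).1 ++ [a], (pairPass l).2)
      else ((pairPass l).1, (pairPass l).2 ++ [a]) := by
  induction l using pairPass.induct with
  | case1 => simp [pairPass]
  | case2 x => simp [pairPass]
  | case3 x y rest ih =>
    have h : (x :: y :: rest) ++ [a] = x :: y :: (rest ++ [a]) := by simp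
    rw [h]
    simp only [pairPass, ih]
    by_cases hp : rest.length % 2 = 0
    · simp [hp]
      omega
    · simp [hp]
      omega

-- the rotated keep list after one pass
def rotKeep (cur : List Int) : List Int :=
  if cur.length % 2 = 1 ∧ (pairPass cur).2 ≠ [] then
    (pairPass cur).2.tail ++ [(pairPass cur).2.headI]
  else (pairPass cur).2

theorem rotKeep_len (cur : List Int) : (rotKeep cur).length = (pairPass cur).2.length := by
  unfold rotKeep
  split
  · rename_i h
    have := List.length_pos_iff.mpr h.2
    simp
    omega
  · rfl

theorem solveLoop_nil (acc : List Int) : solveLoop [] acc = acc := by rw [solveLoop]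
theorem solveLoop_one (x : Int) (acc : List Int) : solveLoop [x] acc = acc ++ [x] := by
  rw [solveLoop]
theorem solveLoop_cons (x y : Int) (rest acc : List Int) :
    solveLoop (x :: y :: rest) acc = solveLoop (rest ++ [y]) (acc ++ [x]) := by
  rw [solveLoop]

theorem rotKeep_even (cur : List Int) (h : cur.length % 2 = 0) :
    rotKeep cur = (pairPass cur).2 := by
  unfold rotKeep
  rw [if_neg]
  intro hcon
  omega

theorem rotKeep_odd (cur : List Int) (h : cur.length % 2 = 1)
    (hk : (pairPass cur).2 ≠ []) :
    rotKeep cur = (pairPass cur).2.tail ++ [(pairPass cur).2.headI] := by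
  unfold rotKeep
  rw [if_pos ⟨h, hk⟩]

theorem rotKeep_nilK (cur : List Int) (hk : (pairPass cur).2 = []) : rotKeep cur = [] := by
  unfold rotKeep
  rw [if_neg, hk]
  intro hcon
  exact hcon.2 hk

theorem pairPass_cons₂ (x y : Int) (rest : List Int) :
    pairPass (x :: y :: rest) = (x :: (pairPass rest).1, y :: (pairPass rest).2) := by
  simp [pairPass]

-- the pass lemma: one batched pass of B equals |cur| alternating steps of A's deque loop
theorem pass_lemma : ∀ (n : Nat) (cur : List Int), cur.length ≤ n → cur ≠ [] →
    solveLoop cur [] = (pairPass cur).1 ++ solveLoop (rotKeep cur) [] := by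
  intro n
  induction n with
  | zero => intro cur h hne; cases cur <;> simp_all
  | succ n ih =>
    intro cur hlen hne
    match cur with
    | [x] =>
      rw [solveLoop_one, rotKeep_nilK [x] (by simp [pairPass]), solveLoop_nil]
      simp [pairPass]
    | x :: y :: rest =>
      rw [solveLoop_cons, solveLoop_acc (rest ++ [y]).length _ le_rfl]
      have hne2 : rest ++ [y] ≠ [] := by simp
      have hl2 : (rest ++ [y]).length ≤ n := by simp at hlen ⊢; omega
      rw [ih (rest ++ [y]) hl2 hne2]
      rw [pairPass_append_one, pairPass_cons₂]
      by_cases hm : rest.length % 2 = 0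
      · -- rest even: cur even, no rotation of cur's keep; the sub-pass rotates its keep
        rw [if_pos hm]
        rw [rotKeep_even (x :: y :: rest) (by simp; omega), pairPass_cons₂]
        by_cases hk : (pairPass rest).2 = []
        · have hkr : rotKeep (rest ++ [y]) = [] := by
            apply rotKeep_nilK
            rw [pairPass_append_one, if_pos hm]
            exact hk
          rw [hkr, hk, solveLoop_nil, solveLoop_one]
          simp
        · match hpk : (pairPass rest).2 with
          | [] => exact absurd hpk hk
          | z :: k2 =>
            have hkr : rotKeep (rest ++ [y]) = k2 ++ [z] := by
              rw [rotKeep_odd (rest ++ [y]) (by simp; omega)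
                  (by rw [pairPass_append_one, if_pos hm, hpk]; simp)]
              rw [pairPass_append_one, if_pos hm, hpk]
              simp
            rw [hkr, solveLoop_cons, solveLoop_acc (k2 ++ [z]).length _ le_rfl,
                solveLoop_acc (k2 ++ [z]).length _ le_rfl ([] ++ [y])]
            simp
      · -- rest odd: cur odd, cur's keep rotates to k_r ++ [y]; the sub-pass has no rotation
        rw [if_neg hm]
        have hkr : rotKeep (rest ++ [y]) = (pairPass rest).2 ++ [y] := by
          rw [rotKeep_even (rest ++ [y]) (by simp; omega), pairPass_append_one, if_neg hm]
        have hrot : rotKeep (x :: y :: rest) = (pairPass rest).2 ++ [y] := by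
          rw [rotKeep_odd (x :: y :: rest) (by simp; omega) (by rw [pairPass_cons₂]; simp),
              pairPass_cons₂]
          simp
        rw [hkr, hrot]
        simp

-- main loop equivalence: B's batched while-loop computes A's deque loop
theorem loop_eq : ∀ (n : Nat) (cur res : List Int), cur.length ≤ n →
    altLoop cur res = solveLoop cur res := by
  intro n
  induction n with
  | zero =>
    intro cur res h
    cases cur <;> simp_all [altLoop]
    rw [solveLoop]
  | succ n ih =>
    intro cur res hlen
    match cur with
    | [] => rw [altLoop, solveLoop]
    | x :: xs =>
      rw [altLoop]
      simp only [foldl_passStep_char, List.nil_append]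
      have hkeep : (if (decide ((x :: xs).length % 2 = 0) = false ∧ (pairPass (x :: xs)).2 ≠ []) then
            (pairPass (x :: xs)).2.tail ++ [(pairPass (x :: xs)).2.headI]
          else (pairPass (x :: xs)).2) = rotKeep (x :: xs) := by
        simp only [rotKeep]
        by_cases h2 : (pairPass (x :: xs)).2 = [] <;> by_cases h1 : (x :: xs).length % 2 = 1 <;>
          simp_all
      rw [hkeep]
      have hlt : (rotKeep (x :: xs)).length ≤ n := by
        rw [rotKeep_len, pairPass_len_snd]
        simp at hlen ⊢
        omega
      rw [ih _ _ hlt]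
      rw [solveLoop_acc (x :: xs).length (x :: xs) le_rfl res]
      rw [pass_lemma (x :: xs).length (x :: xs) le_rfl (by simp)]
      rw [solveLoop_acc (rotKeep (x :: xs)).length _ le_rfl (res ++ (pairPass (x :: xs)).1)]
      simp

-- ===== VERDICT (by name: the statement is the Claim_ definition above) =====
theorem solve_spec : Claim_equal_solve := by
  intro data _ _
  unfold Spec_solve solve solve_alt
  exact (loop_eq _ _ [] le_rfl).symm
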